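-- pv_equiv track=rewrite | github.com/cpulabs/mist32-processor-verification-tool | tool/inst-level/gen_expect/instruction.py | gen_expect_ror
-- ===== SOURCE A (Python) =====
-- def gen_expect_ror(src0, src1):
-- 	result = src0
-- 	loop = 0;
-- 	for cnt in range(src1):
-- 		loop = result & 1;
-- 		result = result >> 1 if result >= 0 else (result+0x100000000) >> 1
-- 		result = (result & 0x7fffffff) | loop << 31
-- 	return result & 0xFFFFFFFF;
-- ===== SOURCE B (Python) =====
-- def gen_expect_ror(src0, src1):
--     # Closed-form 32-bit rotate right: O(1) instead of A's O(src1) loop.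
--     # Negative counts rotate by 0 (A's loop body never runs for them).
--     x = src0 % 0x100000000
--     r = src1 % 32 if src1 > 0 else 0
--     return ((x >> r) + (x << (32 - r))) % 0x100000000
-- ===== Notes on version B (the rewrite author's own statement) =====
-- stated objective: faster
-- what changed: Replaced A's per-bit rotation loop (src1 iterations of shift/mask) with a closed-form 32-bit rotate-right by src1 % 32 using two shifts and one mod.
import Mathlib
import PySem

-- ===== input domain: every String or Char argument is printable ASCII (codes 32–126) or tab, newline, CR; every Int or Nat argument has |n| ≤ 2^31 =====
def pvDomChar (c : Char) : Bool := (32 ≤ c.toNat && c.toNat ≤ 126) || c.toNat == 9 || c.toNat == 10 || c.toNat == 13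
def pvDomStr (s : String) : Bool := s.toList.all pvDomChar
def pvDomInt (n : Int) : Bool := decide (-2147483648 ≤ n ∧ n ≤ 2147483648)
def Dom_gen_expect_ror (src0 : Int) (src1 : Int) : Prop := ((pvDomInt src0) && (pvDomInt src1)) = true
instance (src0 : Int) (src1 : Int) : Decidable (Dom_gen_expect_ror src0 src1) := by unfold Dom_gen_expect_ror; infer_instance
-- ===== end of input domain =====

-- B replaces A's per-bit rotation loop by a closed-form 32-bit rotate-right by src1 % 32 (faster: O(1) vs O(src1)).


-- ===== PORT A =====
-- one iteration of A's loop body (the carried 'loop' is recomputed before use each iteration, so the state is just 'result').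
-- 'result & 1' = result % 2 (Int % is emod = Python's %) and '(r & 0x7fffffff) | loop << 31' = r % 0x80000000 + loop * 0x80000000
-- are exact for every Python int (the OR'ed operands are bit-disjoint); '>> 1' is Python floor division by 2 = PySem.Int.floordiv.
def pvStepA (result : Int) : Int :=
  (if result ≥ 0 then PySem.Int.floordiv result 2
   else PySem.Int.floordiv (result + 4294967296) 2) % 2147483648
    + result % 2 * 2147483648

def gen_expect_ror (src0 : Int) (src1 : Int) : Int :=
  let result := (PySem.List.pyRange 0 src1 1).foldl (fun result _ => pvStepA result) src0
  result % 4294967296   -- result & 0xFFFFFFFF (exact for every int)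

-- ===== PORT B =====
-- x % 0x100000000 and the final % are Int emod = Python %; x >> r = division by 2^r (x ≥ 0), x << k = x * 2^k.
def gen_expect_ror_alt (src0 : Int) (src1 : Int) : Int :=
  let x := src0 % 4294967296
  let r := if src1 > 0 then src1 % 32 else 0
  (x / 2 ^ r.toNat + x * 2 ^ (32 - r.toNat)) % 4294967296

-- ===== PRECONDITION & SPEC =====
def Spec_gen_expect_ror (src0 : Int) (src1 : Int) (out : Int) : Prop := out = gen_expect_ror_alt src0 src1
instance (src0 : Int) (src1 : Int) (out : Int) : Decidable (Spec_gen_expect_ror src0 src1 out) := by unfold Spec_gen_expect_ror; infer_instance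

-- ===== CLAIM (what is proved, stated in full; the proofs are below) =====
def Claim_equal_gen_expect_ror : Prop := ∀ (src0 : Int) (src1 : Int), Dom_gen_expect_ror src0 src1 → Spec_gen_expect_ror src0 src1 (gen_expect_ror src0 src1)

-- ===== LEMMAS AND PROOFS =====

-- rotate right by one bit (of a value in [0, 2^32))
def pvRot1 (x : Int) : Int := x / 2 + x % 2 * 2147483648

-- rotate right by r bits (of a value in [0, 2^32))
def pvR (x : Int) (r : Nat) : Int := x / 2 ^ r + x % 2 ^ r * 2 ^ (32 - r)

theorem pvStepA_eq (res : Int) : pvStepA res = pvRot1 (res % 4294967296) := by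
  unfold pvStepA pvRot1
  rcases (show 0 ≤ res ∨ res < 0 by omega) with h | h
  · rw [if_pos h, PySem.Int.floordiv_eq_ediv_of_pos (by omega)]
    omega
  · rw [if_neg (by omega), PySem.Int.floordiv_eq_ediv_of_pos (by omega)]
    omega

theorem pvR_range (x : Int) (h : 0 ≤ x ∧ x < 4294967296) (r : Nat) (hr : r ≤ 32) :
    0 ≤ pvR x r ∧ pvR x r < 4294967296 := by
  obtain ⟨m, rfl⟩ : ∃ m : Nat, x = (m : Int) := ⟨x.toNat, by omega⟩
  have hm : m < 4294967296 := by exact_mod_cast h.2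
  unfold pvR
  have hnat : m / 2 ^ r + m % 2 ^ r * 2 ^ (32 - r) < 4294967296 := by
    have h1 : m / 2 ^ r < 2 ^ (32 - r) := by
      apply Nat.div_lt_of_lt_mul
      calc m < 4294967296 := hm
        _ = 2 ^ r * 2 ^ (32 - r) := by
            rw [← pow_add, show r + (32 - r) = 32 from by omega]
            norm_num
    have h2 : m % 2 ^ r < 2 ^ r := Nat.mod_lt _ (pow_pos (by norm_num) r)
    have h34 : m % 2 ^ r * 2 ^ (32 - r) + 2 ^ (32 - r) ≤ 4294967296 := by
      calc m % 2 ^ r * 2 ^ (32 - r) + 2 ^ (32 - r)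
          = (m % 2 ^ r + 1) * 2 ^ (32 - r) := by ring
        _ ≤ 2 ^ r * 2 ^ (32 - r) := Nat.mul_le_mul_right _ (by omega)
        _ = 4294967296 := by
            rw [← pow_add, show r + (32 - r) = 32 from by omega]
            norm_num
    omega
  refine ⟨?_, by exact_mod_cast hnat⟩
  exact_mod_cast Nat.zero_le (m / 2 ^ r + m % 2 ^ r * 2 ^ (32 - r))

theorem pvR_32 (x : Int) (h : 0 ≤ x ∧ x < 4294967296) : pvR x 32 = x := by
  unfold pvR; norm_num; omega

-- core rotation step, proved once over Nat (no case split on r)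
theorem pvNatRot (m r : Nat) (hr : r < 32) :
    (m / 2 ^ r + m % 2 ^ r * 2 ^ (32 - r)) / 2
      + (m / 2 ^ r + m % 2 ^ r * 2 ^ (32 - r)) % 2 * 2147483648
    = m / 2 ^ (r + 1) + m % 2 ^ (r + 1) * 2 ^ (32 - (r + 1)) := by
  rw [show 32 - (r + 1) = 31 - r from by omega,
      show 32 - r = (31 - r) + 1 from by omega, pow_succ, pow_succ, Nat.mod_mul,
      show m % 2 ^ r * (2 ^ (31 - r) * 2) = m % 2 ^ r * 2 ^ (31 - r) * 2 from by ring,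
      Nat.add_mul_div_right _ _ (by norm_num : (0:Nat) < 2),
      Nat.add_mul_mod_self_right, Nat.div_div_eq_div_mul, Nat.add_mul,
      show 2 ^ r * (m / 2 ^ r % 2) * 2 ^ (31 - r) = m / 2 ^ r % 2 * 2147483648 from by
        rw [show (2147483648 : Nat) = 2 ^ 31 from by norm_num,
            mul_comm ((2:Nat) ^ r) _, mul_assoc, ← pow_add,
            show r + (31 - r) = 31 from by omega]]
  ring

theorem pvRot1_pvR (x : Int) (h : 0 ≤ x ∧ x < 4294967296) (r : Nat) (hr : r < 32) :
    pvRot1 (pvR x r) = pvR x (r + 1) := by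
  obtain ⟨m, rfl⟩ : ∃ m : Nat, x = (m : Int) := ⟨x.toNat, by omega⟩
  unfold pvRot1 pvR
  exact_mod_cast pvNatRot m r hr

theorem foldl_step (l : List Int) (s : Int) :
    l.foldl (fun result _ => pvStepA result) s = pvStepA^[l.length] s := by
  induction l generalizing s with
  | nil => rfl
  | cons a t ih => simp [List.foldl_cons, ih, Function.iterate_succ_apply]

theorem iterate_step (x : Int) (h : 0 ≤ x ∧ x < 4294967296) (n : Nat) :
    pvStepA^[n] x = pvR x (n % 32) := by
  induction n with
  | zero => simp [pvR]
  | succ n ih =>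
    rw [Function.iterate_succ_apply', ih, pvStepA_eq]
    have hrange := pvR_range x h (n % 32) (by omega)
    rw [Int.emod_eq_of_lt hrange.1 hrange.2]
    rcases (show n % 32 < 31 ∨ n % 32 = 31 by omega) with hlt | h31
    · rw [pvRot1_pvR x h _ (by omega)]
      congr 1
      omega
    · rw [h31, pvRot1_pvR x h 31 (by omega),
          show (31 : Nat) + 1 = 32 from rfl, pvR_32 x h,
          show (n + 1) % 32 = 0 from by omega]
      simp [pvR]

-- B's closed form agrees with the r-bit rotation
theorem pvR_closed (x : Int) (h : 0 ≤ x ∧ x < 4294967296) (m : Nat) (hm : m < 32) :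
    (x / 2 ^ m + x * 2 ^ (32 - m)) % 4294967296 = pvR x m := by
  have hK : (2 : Int) ^ m * 2 ^ (32 - m) = 4294967296 := by
    rw [← pow_add, show m + (32 - m) = 32 from by omega]
    norm_num
  have hdecomp : x * 2 ^ (32 - m)
      = x % 2 ^ m * 2 ^ (32 - m) + x / 2 ^ m * 4294967296 := by
    conv_lhs => rw [← Int.mul_ediv_add_emod x (2 ^ m)]
    rw [add_mul, show 2 ^ m * (x / 2 ^ m) * 2 ^ (32 - m) = x / 2 ^ m * (2 ^ m * 2 ^ (32 - m)) from by ring,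
        hK]
    ring
  rw [hdecomp, ← add_assoc]
  have hrange := pvR_range x h m (by omega)
  unfold pvR at hrange ⊢
  omega

-- ===== VERDICT (by name: the statement is the Claim_ definition above) =====
theorem gen_expect_ror_spec : Claim_equal_gen_expect_ror := by
  intro src0 src1 _
  unfold Spec_gen_expect_ror
  simp only [gen_expect_ror, gen_expect_ror_alt, foldl_step, PySem.List.length_pyRange_one]
  rcases (show src1 ≤ 0 ∨ 0 < src1 by omega) with h1 | h1
  · rw [show (src1 - 0).toNat = 0 from by omega, if_neg (by omega)]
    simp only [Function.iterate_zero, id_eq, Int.toNat_zero, pow_zero, Nat.sub_zero]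
    norm_num
  · rw [if_pos h1]
    have hxr : 0 ≤ src0 % 4294967296 ∧ src0 % 4294967296 < 4294967296 := by omega
    have hcast : pvStepA^[(src1 - 0).toNat] src0
        = pvStepA^[(src1 - 0).toNat] (src0 % 4294967296) := by
      obtain ⟨m', hm'⟩ : ∃ m', (src1 - 0).toNat = m' + 1 := ⟨(src1 - 0).toNat - 1, by omega⟩
      rw [hm', Function.iterate_succ_apply, Function.iterate_succ_apply, pvStepA_eq, pvStepA_eq,
          Int.emod_emod_of_dvd _ dvd_rfl]
    have hrange := pvR_range (src0 % 4294967296) hxr ((src1 - 0).toNat % 32) (by omega)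
    rw [hcast, iterate_step _ hxr, Int.emod_eq_of_lt hrange.1 hrange.2,
        show (src1 % 32).toNat = (src1 - 0).toNat % 32 from by omega,
        pvR_closed _ hxr _ (by omega)]
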